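-- pv_equiv track=rewrite | github.com/malus-security/sandblaster | reverse-sandbox/sandbox_regex.py | unify_two_strings
-- ===== SOURCE A (Python) =====
-- def unify_two_strings(s1, s2):
--     # Find largest common starting substring.
--     lcss = ""
--     for i in range(1, len(s1)+1):
--         if s2.find(s1[:i], 0, i) != -1:
--             lcss = s1[:i]
--     if lcss:
--         s1 = s1[len(lcss):]
--         s2 = s2[len(lcss):]
--     # Find largest common ending substring.
--     lces = ""
--     for i in range(1, len(s1)+1):
--         if s2.find(s1[-i:], len(s2)-i, len(s2)) != -1:
--             lces = s1[-i:]
--     if lces: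
--         s1 = s1[:len(s1)-len(lces)]
--         s2 = s2[:len(s2)-len(lces)]
--
--     if not s1 and not s2:
--         return lcss + lces
--
--     if s1 and s2:
--         return lcss + "(" + s1 + "|" + s2 + ")" + lces
--
--     # Make s1 the empty string.
--     if not s2:
--         aux = s1
--         s1 = s2
--         s2 = aux
--
--     if s2[-1] == '+':
--         s2 = s2[:-1] + '*'
--     else:
--         if len(s2) > 1:
--             s2 = "(" + s2 + ")?"
--         else:
--             s2 = s2 + '?'
--
--     return lcss + s2 + lces
-- ===== SOURCE B (Python) =====
-- def unify_two_strings(s1, s2):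
--     # Single linear scans for the common prefix/suffix lengths (no repeated slicing).
--     n = min(len(s1), len(s2))
--     p = 0
--     while p < n and s1[p] == s2[p]:
--         p += 1
--     m = n - p
--     q = 0
--     while q < m and s1[len(s1) - 1 - q] == s2[len(s2) - 1 - q]:
--         q += 1
--     pre = s1[:p]
--     suf = s1[len(s1) - q:]
--     m1 = s1[p:len(s1) - q]
--     m2 = s2[p:len(s2) - q]
--     if not m1 and not m2:
--         return pre + suf
--     if m1 and m2:
--         return pre + "(" + m1 + "|" + m2 + ")" + suf
--     m3 = m1 or m2
--     if m3[-1] == '+':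
--         m3 = m3[:-1] + '*'
--     elif len(m3) > 1:
--         m3 = "(" + m3 + ")?"
--     else:
--         m3 = m3 + '?'
--     return pre + m3 + suf
-- ===== Notes on version B (the rewrite author's own statement) =====
-- stated objective: faster
-- what changed: A finds the common prefix/suffix by testing every length i with a slice and s.find (quadratic); B computes both lengths with single linear character scans and slices once.
import Mathlib
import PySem

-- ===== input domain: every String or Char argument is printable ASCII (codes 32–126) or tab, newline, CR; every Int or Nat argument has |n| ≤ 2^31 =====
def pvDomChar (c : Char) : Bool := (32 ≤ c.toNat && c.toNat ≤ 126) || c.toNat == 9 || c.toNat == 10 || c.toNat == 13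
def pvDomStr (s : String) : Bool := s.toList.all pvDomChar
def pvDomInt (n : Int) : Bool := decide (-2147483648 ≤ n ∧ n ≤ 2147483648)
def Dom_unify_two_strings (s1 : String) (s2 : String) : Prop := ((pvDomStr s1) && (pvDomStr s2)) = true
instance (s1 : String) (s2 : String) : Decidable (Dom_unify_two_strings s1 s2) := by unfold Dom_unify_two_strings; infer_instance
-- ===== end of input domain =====

-- B replaces A's quadratic slice-and-search loops by two single linear character
-- scans for the common prefix/suffix lengths (objective: faster, asymptotic).

-- ===== PORT A =====
-- literal transliteration of A: for each i, test s2.find(s1[:i], 0, i) (resp. the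
-- suffix variant), keeping the last hit; then strip and assemble the alternation.
def unify_two_strings (s1 : String) (s2 : String) : String :=
  let l1 := s1.toList
  let l2 := s2.toList
  -- for i in range(1, len(s1)+1): if s2.find(s1[:i], 0, i) != -1: lcss = s1[:i]
  let lcss := (PySem.List.pyRange 1 (↑l1.length + 1)).foldl
    (fun acc i => if PySem.Chars.findFrom l2 (PySem.Chars.slice l1 none (some i)) 0 (some i) ≠ -1
                  then PySem.Chars.slice l1 none (some i) else acc) []
  -- if lcss: s1 = s1[len(lcss):]; s2 = s2[len(lcss):]
  let s1a := if lcss = [] then l1 else PySem.Chars.slice l1 (some ↑lcss.length) none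
  let s2a := if lcss = [] then l2 else PySem.Chars.slice l2 (some ↑lcss.length) none
  -- for i in range(1, len(s1)+1): if s2.find(s1[-i:], len(s2)-i, len(s2)) != -1: lces = s1[-i:]
  let lces := (PySem.List.pyRange 1 (↑s1a.length + 1)).foldl
    (fun acc i => if PySem.Chars.findFrom s2a (PySem.Chars.slice s1a (some (-i)) none) (↑s2a.length - i) (some ↑s2a.length) ≠ -1
                  then PySem.Chars.slice s1a (some (-i)) none else acc) []
  -- if lces: s1 = s1[:len(s1)-len(lces)]; s2 = s2[:len(s2)-len(lces)]
  let s1b := if lces = [] then s1a else PySem.Chars.slice s1a none (some (↑s1a.length - ↑lces.length))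
  let s2b := if lces = [] then s2a else PySem.Chars.slice s2a none (some (↑s2a.length - ↑lces.length))
  if s1b = [] ∧ s2b = [] then String.ofList (lcss ++ lces)
  else if s1b ≠ [] ∧ s2b ≠ [] then
    String.ofList (lcss ++ ['('] ++ s1b ++ ['|'] ++ s2b ++ [')'] ++ lces)
  else
    -- the swap only makes s2 the nonempty string; only s2 is used afterwards
    let t := if s2b = [] then s1b else s2b
    let t2 := if PySem.List.pyGet? t (-1) == some '+'
              then PySem.Chars.slice t none (some (-1)) ++ ['*']
              else if 1 < t.length then ['('] ++ t ++ [')'] ++ ['?'] else t ++ ['?']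
    String.ofList (lcss ++ t2 ++ lces)

-- ===== PORT B =====
-- B's while loop advancing while characters agree = structural recursion on the two lists
def lcpLen : List Char → List Char → Nat
  | a :: as, b :: bs => if a = b then lcpLen as bs + 1 else 0
  | _, _ => 0

def unify_two_strings_alt (s1 : String) (s2 : String) : String :=
  let l1 := s1.toList
  let l2 := s2.toList
  let p := lcpLen l1 l2
  -- B's backwards scan over the two remainders = lcpLen of their reverses
  let q := lcpLen (l1.drop p).reverse (l2.drop p).reverse
  let pre := l1.take p
  let suf := l1.drop (l1.length - q)
  let m1 := (l1.drop p).take (l1.length - q - p)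
  let m2 := (l2.drop p).take (l2.length - q - p)
  if m1 = [] ∧ m2 = [] then String.ofList (pre ++ suf)
  else if m1 ≠ [] ∧ m2 ≠ [] then
    String.ofList (pre ++ ['('] ++ m1 ++ ['|'] ++ m2 ++ [')'] ++ suf)
  else
    let m3 := if m1 = [] then m2 else m1
    let m4 := if m3.getLast? == some '+' then m3.dropLast ++ ['*']
              else if 1 < m3.length then ['('] ++ m3 ++ [')'] ++ ['?'] else m3 ++ ['?']
    String.ofList (pre ++ m4 ++ suf)

-- ===== PRECONDITION & SPEC =====
def Spec_unify_two_strings (s1 : String) (s2 : String) (out : String) : Prop := out = unify_two_strings_alt s1 s2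
instance (s1 : String) (s2 : String) (out : String) : Decidable (Spec_unify_two_strings s1 s2 out) := by unfold Spec_unify_two_strings; infer_instance

-- ===== CLAIM (what is proved, stated in full; the proofs are below) =====
def Claim_equal_unify_two_strings : Prop := ∀ (s1 : String) (s2 : String), Dom_unify_two_strings s1 s2 → Spec_unify_two_strings s1 s2 (unify_two_strings s1 s2)

-- ===== LEMMAS AND PROOFS =====

lemma lcpLen_le_left (xs ys : List Char) : lcpLen xs ys ≤ xs.length := by
  induction xs generalizing ys with
  | nil => simp [lcpLen]
  | cons a as ih =>
    cases ys with
    | nil => simp [lcpLen]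
    | cons b bs =>
      simp only [lcpLen]
      split
      · simpa using ih bs
      · simp

lemma lcpLen_le_right (xs ys : List Char) : lcpLen xs ys ≤ ys.length := by
  induction xs generalizing ys with
  | nil => simp [lcpLen]
  | cons a as ih =>
    cases ys with
    | nil => simp [lcpLen]
    | cons b bs =>
      simp only [lcpLen]
      split
      · simpa using ih bs
      · simp

lemma take_eq_iff_le_lcpLen (xs ys : List Char) (i : Nat) (hi : i ≤ xs.length) :
    xs.take i = ys.take i ↔ i ≤ lcpLen xs ys := by
  induction xs generalizing ys i with
  | nil =>
    have : i = 0 := by simpa using hi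
    subst this
    simp [lcpLen]
  | cons a as ih =>
    cases i with
    | zero => simp
    | succ k =>
      cases ys with
      | nil =>
        simp only [List.take_nil, lcpLen]
        constructor
        · intro h; simp at h
        · intro h
          cases as <;> simp at h
      | cons b bs =>
        simp only [List.take_succ_cons, lcpLen]
        by_cases hab : a = b
        · subst hab
          rw [if_pos rfl]
          simp only [List.cons.injEq, true_and]
          rw [ih bs k (by simpa using hi)]
          omega
        · simp only [if_neg hab]
          constructor
          · intro h; exact absurd (List.head_eq_of_cons_eq h) hab
          · omega

-- the fold over range(1, n+1) keeping the last index whose test holds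
lemma foldl_range_last {α : Type} (f : Int → α) (cond : Int → Prop) [DecidablePred cond]
    (init : α) (n p : Nat) (hp : p ≤ n)
    (hc : ∀ i : Nat, 1 ≤ i → i ≤ n → (cond ↑i ↔ i ≤ p)) :
    (PySem.List.pyRange 1 (↑n + 1)).foldl (fun acc i => if cond i then f i else acc) init
      = if p = 0 then init else f ↑p := by
  induction n with
  | zero =>
    have : PySem.List.pyRange 1 ((0:Nat) + 1) = [] := by norm_num [PySem.List.pyRange]
    rw [this]
    interval_cases p
    simp
  | succ m ih =>
    have h1 : (1:Int) ≤ ↑m + 1 := by omega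
    have : (↑(m+1) : Int) + 1 = (↑m + 1) + 1 := by push_cast; ring
    rw [this, PySem.List.pyRange_one_succ_right h1, List.foldl_append]
    simp only [List.foldl_cons, List.foldl_nil]
    by_cases hpm : p = m + 1
    · have hcond : cond (↑m + 1) := by
        have := (hc (m+1) (by omega) (by omega)).mpr (by omega)
        simpa [hpm] using this
      rw [if_pos hcond, hpm]
      norm_num
    · have hple : p ≤ m := by omega
      have hcond : ¬ cond (↑m + 1) := by
        intro h
        have := (hc (m+1) (by omega) (by omega)).mp (by push_cast at h ⊢; exact_mod_cast h)
        omega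
      rw [if_neg hcond, ih hple (fun i h1 h2 => hc i h1 (by omega))]

lemma infix_eq_of_length_le {s t : List Char} (h : s <:+: t) (hl : t.length ≤ s.length) : s = t :=
  h.sublist.eq_of_length_le hl

-- the prefix-loop test: s2.find(s1[:i], 0, i) != -1  ↔  i ≤ lcp(s1, s2)
lemma condA_iff (l1 l2 : List Char) (i : Nat) (h1 : 1 ≤ i) (h2 : i ≤ l1.length) :
    (PySem.Chars.findFrom l2 (PySem.Chars.slice l1 none (some ↑i)) 0 (some ↑i) ≠ -1)
      ↔ i ≤ lcpLen l1 l2 := by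
  rw [← take_eq_iff_le_lcpLen l1 l2 i h2]
  rw [PySem.Chars.slice_eq_listSlice, PySem.List.slice_to_natCast]
  simp only [PySem.Chars.findFrom]
  norm_num
  by_cases h : l2.length < i
  · rw [if_pos h]
    constructor
    · rintro ⟨-, hf⟩
      exfalso
      have hin := (PySem.Chars.find_ne_neg_one_iff _ _).mp hf
      have := hin.length_le
      simp [List.length_take] at this
      omega
    · intro he
      exfalso
      have := congrArg List.length he
      simp [List.length_take] at this
      omega
  · rw [if_neg h]
    have hi0 : ¬ ((i:Int) < 0) := by omega
    rw [if_neg hi0]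
    simp only [Int.toNat_natCast]
    constructor
    · rintro ⟨-, hf⟩
      have hin := (PySem.Chars.find_ne_neg_one_iff _ _).mp hf
      exact infix_eq_of_length_le hin (by simp [List.length_take]; omega)
    · intro he
      refine ⟨by omega, ?_⟩
      rw [he]
      exact (PySem.Chars.find_ne_neg_one_iff _ _).mpr (List.infix_refl _)

-- the suffix-loop test: s2.find(s1[-i:], len(s2)-i, len(s2)) != -1  ↔  i ≤ lcp(rev s1, rev s2)
lemma condB_iff (r1 r2 : List Char) (i : Nat) (h1 : 1 ≤ i) (h2 : i ≤ r1.length) :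
    (PySem.Chars.findFrom r2 (PySem.Chars.slice r1 (some (-↑i)) none) (↑r2.length - ↑i) (some ↑r2.length) ≠ -1)
      ↔ i ≤ lcpLen r1.reverse r2.reverse := by
  have key : (i ≤ r2.length ∧ r1.drop (r1.length - i) = r2.drop (r2.length - i))
      ↔ i ≤ lcpLen r1.reverse r2.reverse := by
    rw [← take_eq_iff_le_lcpLen r1.reverse r2.reverse i (by simpa using h2)]
    constructor
    · rintro ⟨hi, he⟩
      rw [List.take_reverse, List.take_reverse, he]
    · intro he
      have hi : i ≤ r2.length := by
        have h := congrArg List.length he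
        simp only [List.length_take, List.length_reverse] at h
        omega
      refine ⟨hi, ?_⟩
      rw [List.take_reverse, List.take_reverse] at he
      exact List.reverse_injective he
  rw [← key]
  rw [PySem.Chars.slice_eq_listSlice, PySem.List.slice_from_neg_natCast _ _ (by omega)]
  simp only [PySem.Chars.findFrom]
  norm_num
  have hn2 : ¬ ((r2.length : Int) < 0) := by omega
  simp only [if_neg hn2, Int.toNat_natCast, List.take_length]
  have hsublen : (List.drop (r1.length - i) r1).length = i := by
    simp [List.length_drop]; omega
  by_cases h : r2.length < i
  · rw [if_pos h]
    constructor
    · rintro ⟨-, hf, -⟩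
      exfalso
      have hin := (PySem.Chars.find_ne_neg_one_iff _ _).mp hf
      have hl := hin.length_le
      rw [hsublen] at hl
      have : (List.drop (if (r2.length:Int) - i + r2.length < 0 then 0
              else (r2.length:Int) - i + r2.length).toNat r2).length ≤ r2.length := by
        simp [List.length_drop]
      omega
    · rintro ⟨hi, -⟩; omega
  · rw [if_neg h]
    have hst : ((r2.length : Int) - ↑i).toNat = r2.length - i := by omega
    rw [hst]
    have hwinlen : (List.drop (r2.length - i) r2).length = i := by
      simp [List.length_drop]; omega
    constructor
    · rintro ⟨-, hf, -⟩
      refine ⟨by omega, ?_⟩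
      have hin := (PySem.Chars.find_ne_neg_one_iff _ _).mp hf
      exact infix_eq_of_length_le hin (by omega)
    · rintro ⟨-, he⟩
      have hf : PySem.Chars.find (List.drop (r2.length - i) r2) (List.drop (r1.length - i) r1) ≠ -1 := by
        rw [he]
        exact (PySem.Chars.find_ne_neg_one_iff _ _).mpr (List.infix_refl _)
      refine ⟨by omega, hf, ?_⟩
      have hge := PySem.Chars.neg_one_le_find (List.drop (r2.length - i) r2) (List.drop (r1.length - i) r1)
      omega

lemma foldA (l1 l2 : List Char) :
    (PySem.List.pyRange 1 (↑l1.length + 1)).foldl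
      (fun acc i => if PySem.Chars.findFrom l2 (PySem.Chars.slice l1 none (some i)) 0 (some i) ≠ -1
                    then PySem.Chars.slice l1 none (some i) else acc) []
      = l1.take (lcpLen l1 l2) := by
  rw [foldl_range_last (f := fun i => PySem.Chars.slice l1 none (some i))
        (cond := fun i => PySem.Chars.findFrom l2 (PySem.Chars.slice l1 none (some i)) 0 (some i) ≠ -1)
        [] l1.length (lcpLen l1 l2) (lcpLen_le_left l1 l2)
        (fun i hi1 hi2 => condA_iff l1 l2 i hi1 hi2)]
  split
  · rename_i h; rw [h]; simp
  · rw [PySem.Chars.slice_eq_listSlice, PySem.List.slice_to_natCast]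

lemma foldB (r1 r2 : List Char) :
    (PySem.List.pyRange 1 (↑r1.length + 1)).foldl
      (fun acc i => if PySem.Chars.findFrom r2 (PySem.Chars.slice r1 (some (-i)) none) (↑r2.length - i) (some ↑r2.length) ≠ -1
                    then PySem.Chars.slice r1 (some (-i)) none else acc) []
      = r1.drop (r1.length - lcpLen r1.reverse r2.reverse) := by
  have hle : lcpLen r1.reverse r2.reverse ≤ r1.length := by
    simpa using lcpLen_le_left r1.reverse r2.reverse
  rw [foldl_range_last (f := fun i => PySem.Chars.slice r1 (some (-i)) none)
        (cond := fun i => PySem.Chars.findFrom r2 (PySem.Chars.slice r1 (some (-i)) none) (↑r2.length - i) (some ↑r2.length) ≠ -1)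
        [] r1.length (lcpLen r1.reverse r2.reverse) hle
        (fun i hi1 hi2 => condB_iff r1 r2 i hi1 hi2)]
  split
  · rename_i h; rw [h]; simp
  · rename_i h
    rw [PySem.Chars.slice_eq_listSlice, PySem.List.slice_from_neg_natCast _ _ (by omega)]


-- stripping the found prefix: "if lcss: s = s[len(lcss):]" is a plain drop
lemma slice_drop_guard (x : List Char) (p : Nat) (t : List Char) (ht : t.length = p)
    (h0 : t = [] → p = 0) :
    (if t = [] then x else PySem.Chars.slice x (some ↑t.length) none) = x.drop p := by
  split
  · rw [h0 ‹_›, List.drop_zero]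
  · rw [PySem.Chars.slice_eq_listSlice, ht, PySem.List.slice_from_natCast]

-- stripping the found suffix: "if lces: s = s[:len(s)-len(lces)]" is a plain take
lemma slice_take_guard (x : List Char) (q : Nat) (hq : q ≤ x.length) (t : List Char)
    (ht : t.length = q) :
    (if t = [] then x else PySem.Chars.slice x none (some (↑x.length - ↑t.length)))
      = x.take (x.length - q) := by
  split
  · rename_i h
    rw [h] at ht
    simp only [List.length_nil] at ht
    rw [← ht]
    simp
  · rw [PySem.Chars.slice_eq_listSlice, ht]
    have : (↑x.length - ↑q : Int) = ↑(x.length - q) := by omega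
    rw [this, PySem.List.slice_to_natCast]

lemma pyGet_neg_one_eq_getLast? (l : List Char) : PySem.List.pyGet? l (-1) = l.getLast? := by
  simp [PySem.List.pyGet?, PySem.List.pyIdx?, List.getLast?_eq_getElem?]
  rcases l with _ | ⟨a, t⟩ <;> simp

-- A's tail (swap so that s2 is nonempty, pyGet?/slice) = B's tail (select the nonempty side, getLast?/dropLast)
lemma tail_eq (pre a b suf : List Char) :
    (if a = [] ∧ b = [] then String.ofList (pre ++ suf)
     else if a ≠ [] ∧ b ≠ [] then String.ofList (pre ++ ['('] ++ a ++ ['|'] ++ b ++ [')'] ++ suf)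
     else
       let t := if b = [] then a else b
       let t2 := if PySem.List.pyGet? t (-1) == some '+'
                 then PySem.Chars.slice t none (some (-1)) ++ ['*']
                 else if 1 < t.length then ['('] ++ t ++ [')'] ++ ['?'] else t ++ ['?']
       String.ofList (pre ++ t2 ++ suf))
    =
    (if a = [] ∧ b = [] then String.ofList (pre ++ suf)
     else if a ≠ [] ∧ b ≠ [] then String.ofList (pre ++ ['('] ++ a ++ ['|'] ++ b ++ [')'] ++ suf)
     else
       let m3 := if a = [] then b else a
       let m4 := if m3.getLast? == some '+' then m3.dropLast ++ ['*']
                 else if 1 < m3.length then ['('] ++ m3 ++ [')'] ++ ['?'] else m3 ++ ['?']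
       String.ofList (pre ++ m4 ++ suf)) := by
  split
  · rfl
  split
  · rfl
  rename_i hne hnb
  simp only []
  have hsame : (if b = [] then a else b) = (if a = [] then b else a) := by
    by_cases ha : a = []
    · have hb : b ≠ [] := fun hb => hne ⟨ha, hb⟩
      rw [if_neg hb, if_pos ha]
    · have hb : b = [] := by
        by_contra hb
        exact hnb ⟨ha, hb⟩
      rw [if_pos hb, if_neg ha]
  rw [hsame, pyGet_neg_one_eq_getLast?, PySem.Chars.slice_eq_listSlice, PySem.List.slice_to_neg_one]

-- ===== VERDICT (by name: the statement is the Claim_ definition above) =====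
theorem unify_two_strings_spec : Claim_equal_unify_two_strings := by
  intro s1 s2 _
  show unify_two_strings s1 s2 = unify_two_strings_alt s1 s2
  unfold unify_two_strings unify_two_strings_alt
  simp only []
  generalize s1.toList = l1
  generalize s2.toList = l2
  set p := lcpLen l1 l2 with hp
  have hp1 : p ≤ l1.length := lcpLen_le_left l1 l2
  have hp2 : p ≤ l2.length := lcpLen_le_right l1 l2
  rw [foldA l1 l2, ← hp]
  have htp : (l1.take p).length = p := by simp [List.length_take]; omega
  have h0 : l1.take p = [] → p = 0 := by
    intro h; rw [h] at htp; simpa using htp.symm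
  rw [slice_drop_guard l1 p _ htp h0, slice_drop_guard l2 p _ htp h0]
  rw [foldB (l1.drop p) (l2.drop p)]
  set q := lcpLen (l1.drop p).reverse (l2.drop p).reverse with hq
  have hq1 : q ≤ l1.length - p := by
    have := lcpLen_le_left (l1.drop p).reverse (l2.drop p).reverse
    simpa using this
  have hq2 : q ≤ l2.length - p := by
    have := lcpLen_le_right (l1.drop p).reverse (l2.drop p).reverse
    simpa using this
  have htq : ((l1.drop p).drop ((l1.drop p).length - q)).length = q := by
    simp [List.length_drop]; omega
  rw [slice_take_guard (l1.drop p) q (by simp [List.length_drop]; omega) _ htq,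
      slice_take_guard (l2.drop p) q (by simp [List.length_drop]; omega) _ htq]
  have e1 : (l1.drop p).drop ((l1.drop p).length - q) = l1.drop (l1.length - q) := by
    rw [List.drop_drop]
    congr 1
    simp [List.length_drop]
    omega
  have e2 : (l1.drop p).take ((l1.drop p).length - q) = (l1.drop p).take (l1.length - q - p) := by
    congr 1
    simp [List.length_drop]
    omega
  have e3 : (l2.drop p).take ((l2.drop p).length - q) = (l2.drop p).take (l2.length - q - p) := by
    congr 1
    simp [List.length_drop]
    omega
  rw [e1, e2, e3]
  exact tail_eq (l1.take p) ((l1.drop p).take (l1.length - q - p)) ((l2.drop p).take (l2.length - q - p)) (l1.drop (l1.length - q))
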